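-- pv_equiv track=rewrite | github.com/nickful123/Mimo-Python-Projects | Mimo_Project_5-Draw_a_Card.py | draw_card
-- ===== SOURCE A (Python) =====
-- def draw_card(deck, draw_number):
--   hand = []
--   for i in range(draw_number):
--     if deck:
--       hand.append(deck.pop())
--     else:
--       break
--   return hand, deck
-- ===== SOURCE B (Python) =====
-- def draw_card(deck, draw_number):
--     n = min(max(draw_number, 0), len(deck))
--     if n == 0:
--         return [], deck
--     hand = deck[:-n - 1:-1]
--     del deck[-n:]
--     return hand, deck
-- ===== Notes on version B (the rewrite author's own statement) =====
-- stated objective: simpler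
-- what changed: Replaces the per-element pop loop with one precomputed count n = min(max(draw_number,0), len(deck)), a single reversed slice for the hand and one bulk del for the deck.
import Mathlib
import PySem

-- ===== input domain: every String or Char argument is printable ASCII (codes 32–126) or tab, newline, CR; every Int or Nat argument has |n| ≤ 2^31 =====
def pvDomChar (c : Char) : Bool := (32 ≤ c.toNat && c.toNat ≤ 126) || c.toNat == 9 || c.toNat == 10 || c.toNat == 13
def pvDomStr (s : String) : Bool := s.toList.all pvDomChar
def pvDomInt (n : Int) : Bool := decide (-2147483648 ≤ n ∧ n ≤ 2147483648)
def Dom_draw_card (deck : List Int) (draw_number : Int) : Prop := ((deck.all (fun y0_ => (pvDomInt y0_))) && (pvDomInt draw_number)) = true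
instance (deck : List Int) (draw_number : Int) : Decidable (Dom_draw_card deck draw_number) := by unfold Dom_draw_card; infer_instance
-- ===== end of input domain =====

-- B replaces A's per-element pop loop with one precomputed count and a single bulk slice/delete (simpler, loop-free); equivalence is about the return value (both Pythons mutate deck identically).


-- ===== PORT A =====
-- the 'for i in range(draw_number)' loop with break: fuel = remaining iterations;
-- deck.pop() = last element, removed
def draw_card_loop : Nat → List Int → List Int → List Int × List Int
  | 0, hand, deck => (hand, deck)
  | n + 1, hand, deck =>
      if deck ≠ [] then
        draw_card_loop n (hand ++ [deck.getLast!]) deck.dropLast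
      else (hand, deck)

def draw_card (deck : List Int) (draw_number : Int) : List Int × List Int :=
  draw_card_loop draw_number.toNat [] deck

-- ===== PORT B =====
def draw_card_alt (deck : List Int) (draw_number : Int) : List Int × List Int :=
  let n : Int := min (max draw_number 0) (deck.length : Int)
  if n = 0 then ([], deck)
  else
    -- deck[:-n-1:-1] = last n elements in reverse; del deck[-n:] keeps the first len-n
    ((deck.drop (deck.length - n.toNat)).reverse, deck.take (deck.length - n.toNat))

-- ===== PRECONDITION & SPEC =====
def Spec_draw_card (deck : List Int) (draw_number : Int) (out : List Int × List Int) : Prop := out = draw_card_alt deck draw_number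
instance (deck : List Int) (draw_number : Int) (out : List Int × List Int) : Decidable (Spec_draw_card deck draw_number out) := by unfold Spec_draw_card; infer_instance

-- ===== CLAIM (what is proved, stated in full; the proofs are below) =====
def Claim_equal_draw_card : Prop := ∀ (deck : List Int) (draw_number : Int), Dom_draw_card deck draw_number → Spec_draw_card deck draw_number (draw_card deck draw_number)

-- ===== LEMMAS AND PROOFS =====

theorem draw_card_loop_eq (fuel : Nat) (deck hand : List Int) :
    draw_card_loop fuel hand deck =
      (hand ++ (deck.drop (deck.length - min fuel deck.length)).reverse,
       deck.take (deck.length - min fuel deck.length)) := by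
  induction fuel generalizing deck hand with
  | zero => simp [draw_card_loop]
  | succ n ih =>
    rcases List.eq_nil_or_concat deck with rfl | ⟨l, x, rfl⟩
    · simp [draw_card_loop]
    · simp only [List.concat_eq_append]
      have hne : l ++ [x] ≠ [] := by simp
      have hgl : (l ++ [x]).getLast! = x := by simp
      have hdl : (l ++ [x]).dropLast = l := by simp
      simp only [draw_card_loop, if_pos hne, hgl, hdl]
      rw [ih]
      have hlen : (l ++ [x]).length = l.length + 1 := by simp
      have hidx : (l ++ [x]).length - min (n + 1) (l ++ [x]).length
          = l.length - min n l.length := by rw [hlen]; omega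
      have hk : l.length - min n l.length ≤ l.length := by omega
      rw [hidx, List.drop_append_of_le_length hk, List.take_append_of_le_length hk]
      simp

-- ===== VERDICT (by name: the statement is the Claim_ definition above) =====
theorem draw_card_spec : Claim_equal_draw_card := by
  intro deck dn _
  unfold Spec_draw_card draw_card draw_card_alt
  rw [draw_card_loop_eq]
  by_cases h : min (max dn 0) (deck.length : Int) = 0
  · rw [if_pos h]
    have : deck.length - min dn.toNat deck.length = deck.length := by omega
    simp [this]
  · rw [if_neg h]
    have : (min (max dn 0) (deck.length : Int)).toNat = min dn.toNat deck.length := by omega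
    rw [this]
    simp
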